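-- pv_equiv track=rewrite | github.com/JuanRx19/Ada2024-1 | Tarea 4 - La redencion/assembly.py | solve
-- ===== SOURCE A (Python) =====
-- def solve(N, val):
--     sortVal = val.copy()
--     sortVal.sort()
--     ans = 0
--     iterSort = 0
--     for i in range(N):
--         if(val[i] != sortVal[iterSort]):
--             ans+=1
--         else:
--             iterSort+=1
--
--     return ans
-- ===== SOURCE B (Python) =====
-- def solve(N, val):
--     # Interval/run algorithm: one pass records, per distinct value, its first
--     # index, last index and multiplicity; then the distinct values are visited
--     # in increasing order.  A value is fully matched by the greedy process iff
--     # all of its occurrences lie in the still-unscanned window [p, n); then the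
--     # scan pointer jumps straight past its last occurrence.  The first value
--     # that cannot be fully matched contributes only its occurrences inside the
--     # window, and everything after it is mismatched, so the answer is
--     # n - matched.
--     info = {}  # value -> (first index, last index, multiplicity)
--     for i, x in enumerate(val):
--         f, _, c = info.get(x, (i, i, 0))
--         info[x] = (f, i, c + 1)
--     n = max(N, 0)
--     p = 0
--     matched = 0
--     for v, (f, l, c) in sorted(info.items()):
--         if p <= f and l < n:
--             matched += c
--             p = l + 1
--         else:
--             matched += val[p:n].count(v)
--             break
--     return n - matched
-- ===== Notes on version B (the rewrite author's own statement) =====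
-- stated objective: alternative
-- what changed: Replaces A's element-by-element greedy scan with a two-pointer into the sorted copy by an interval/run algorithm: one pass records first index, last index and multiplicity per distinct value, then the distinct values are visited in increasing order, each fully-matchable value is consumed in O(1) by jumping the scan pointer past its last occurrence, and the first unmatchable value ends the computation with a single slice count.
import Mathlib
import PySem

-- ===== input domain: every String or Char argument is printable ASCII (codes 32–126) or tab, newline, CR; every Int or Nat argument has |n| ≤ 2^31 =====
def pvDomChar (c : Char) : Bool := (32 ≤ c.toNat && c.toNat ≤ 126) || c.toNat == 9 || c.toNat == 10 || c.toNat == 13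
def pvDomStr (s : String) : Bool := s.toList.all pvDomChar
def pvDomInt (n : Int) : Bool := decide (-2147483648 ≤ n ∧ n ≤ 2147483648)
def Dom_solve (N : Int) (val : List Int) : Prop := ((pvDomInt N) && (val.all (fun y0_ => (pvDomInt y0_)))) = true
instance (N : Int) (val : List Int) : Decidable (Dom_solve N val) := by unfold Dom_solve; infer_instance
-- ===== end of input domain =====

-- B replaces A's element-wise greedy scan (two-pointer into the sorted copy) by an
-- interval/run algorithm over per-value (first, last, count) records (objective:
-- alternative, same asymptotic cost).


-- ===== PORT A =====
-- val[i] / sortVal[iterSort] are ported as pyGet? (none = IndexError); the two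
-- Option values are compared, which agrees with Python wherever A returns.
def solve (N : Int) (val : List Int) : Int :=
  let sortVal := PySem.List.sorted val (fun x => x) false
  let st := (PySem.List.pyRange 0 N 1).foldl
    (fun (st : Int × Int) i =>
      if PySem.List.pyGet? val i ≠ PySem.List.pyGet? sortVal st.2
      then (st.1 + 1, st.2)
      else (st.1, st.2 + 1))
    (0, 0)
  st.1

-- ===== PORT B =====
-- "f, _, c = info.get(x, (i, i, 0)); info[x] = (f, i, c + 1)" of Source B
def infoStep (d : PySem.Dict Int (Int × Int × Int)) (ix : Int × Int) :
    PySem.Dict Int (Int × Int × Int) :=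
  d.insert ix.2 ((d.getD ix.2 (ix.1, ix.1, 0)).1, ix.1, (d.getD ix.2 (ix.1, ix.1, 0)).2.2 + 1)

-- "info = {}; for i, x in enumerate(val): …" of Source B
def buildInfo (val : List Int) : PySem.Dict Int (Int × Int × Int) :=
  (PySem.List.enumerate val 0).foldl infoStep PySem.Dict.empty

-- "for v, (f, l, c) in sorted(info.items()): … break" of Source B (the break returns matched)
def altLoop (val : List Int) (n : Int) : List (Int × Int × Int × Int) → Int → Int → Int
  | [], _, matched => matched
  | (v, f, l, c) :: rest, p, matched =>
      if p ≤ f ∧ l < n then altLoop val n rest (l + 1) (matched + c)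
      else matched + ((PySem.List.slice val (some p) (some n)).count v : Int)

-- sorted(info.items()) compares key-first tuples; the dict's keys are distinct, so it
-- is exactly a (stable) sort by the key component, ported with key = first component.
def solve_alt (N : Int) (val : List Int) : Int :=
  let info := buildInfo val
  let n := max N 0
  n - altLoop val n (PySem.List.sorted info.items (fun q => q.1) false) 0 0

-- ===== PRECONDITION & SPEC =====
-- A raises IndexError (val[i]) exactly when N > len(val); those inputs are excluded.
def Pre_solve (N : Int) (val : List Int) : Prop := N ≤ (val.length : Int)
instance (N : Int) (val : List Int) : Decidable (Pre_solve N val) := by unfold Pre_solve; infer_instance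
def pvWitness_solve : Int × List Int := (3, [2, 1, 3])

def Spec_solve (N : Int) (val : List Int) (out : Int) : Prop := out = solve_alt N val
instance (N : Int) (val : List Int) (out : Int) : Decidable (Spec_solve N val out) := by unfold Spec_solve; infer_instance

-- ===== CLAIM (what is proved, stated in full; the proofs are below) =====
def Claim_equal_solve : Prop := ∀ (N : Int) (val : List Int), Dom_solve N val → Pre_solve N val → Spec_solve N val (solve N val)

-- ===== LEMMAS AND PROOFS =====

-- greedy match count of a window against (a suffix of) the sorted list; A's loop
-- counts a mismatch at every step that is not a match, so A = n - matchCount.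
def mcGreedy : List Int → List Int → Nat
  | [], _ => 0
  | _ :: xs, [] => mcGreedy xs []
  | x :: xs, y :: ys => if x = y then mcGreedy xs ys + 1 else mcGreedy xs (y :: ys)

theorem mcGreedy_nil_right : ∀ xs : List Int, mcGreedy xs [] = 0 := by
  intro xs; induction xs with
  | nil => rfl
  | cons x xs ih => simpa [mcGreedy] using ih

-- A's loop, recast as structural recursion on the number of remaining steps
def aLoop (val s : List Int) : Nat → Int → Int → Int → Int
  | 0, _, _, ans => ans
  | n + 1, i, j, ans =>
      if PySem.List.pyGet? val i ≠ PySem.List.pyGet? s j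
      then aLoop val s n (i + 1) j (ans + 1)
      else aLoop val s n (i + 1) (j + 1) ans

theorem foldl_eq_aLoop (val s : List Int) (n : Nat) :
    ∀ (i j ans : Int),
      ((PySem.List.pyRange i (i + n) 1).foldl
        (fun (st : Int × Int) k =>
          if PySem.List.pyGet? val k ≠ PySem.List.pyGet? s st.2
          then (st.1 + 1, st.2)
          else (st.1, st.2 + 1))
        (ans, j)).1 = aLoop val s n i j ans := by
  induction n with
  | zero =>
      intro i j ans
      rw [show i + ((0:Nat):Int) = i by omega, PySem.List.pyRange_one_eq_nil (le_refl i)]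
      rfl
  | succ n ih =>
      intro i j ans
      rw [PySem.List.pyRange_one_cons (by omega : i < i + ((n:Nat) + 1 : Nat))]
      rw [show i + (((n:Nat) + 1 : Nat) : Int) = (i + 1) + ((n : Nat) : Int) by push_cast; omega]
      simp only [List.foldl_cons, aLoop]
      by_cases h : PySem.List.pyGet? val i ≠ PySem.List.pyGet? s j
      · simp only [if_pos h]; exact ih (i + 1) j (ans + 1)
      · simp only [if_neg h]; exact ih (i + 1) (j + 1) ans

theorem aLoop_eq_mc (val s : List Int) (n : Nat) :
    ∀ (i j ans : Int), 0 ≤ i → 0 ≤ j → i + n ≤ (val.length : Int) →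
      aLoop val s n i j ans
        = ans + n - (mcGreedy ((val.drop i.toNat).take n) (s.drop j.toNat) : Int) := by
  induction n with
  | zero =>
      intro i j ans _ _ _
      simp [aLoop, mcGreedy]
  | succ n ih =>
      intro i j ans h0i h0j hlen
      have hi_lt : i < (val.length : Int) := by push_cast at hlen; omega
      have hiN : i.toNat < val.length := by omega
      have hval : PySem.List.pyGet? val i = some (val[i.toNat]'hiN) :=
        PySem.List.pyGet?_eq_some_getElem val h0i hi_lt
      have hdropval := (List.getElem_cons_drop hiN).symm
      have hwin : (val.drop i.toNat).take (n + 1)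
          = val[i.toNat]'hiN :: ((val.drop (i.toNat + 1)).take n) := by
        rw [hdropval]; rfl
      have hi1 : (i + 1).toNat = i.toNat + 1 := by omega
      have hlen' : (i + 1) + (n : Int) ≤ (val.length : Int) := by push_cast at hlen; omega
      cases hs : s.drop j.toNat with
      | nil =>
          have hjlen : ¬ PySem.Raise.InRange s.length j := by
            have := List.drop_eq_nil_iff.mp hs
            simp [PySem.Raise.InRange]
            omega
          have hsj : PySem.List.pyGet? s j = none := by
            rw [PySem.List.pyGet?_eq_none_iff]
            exact hjlen
          simp only [aLoop, hval, hsj]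
          rw [if_pos (by simp)]
          have hrec := ih (i + 1) j (ans + 1) (by omega) h0j hlen'
          rw [hi1, hs] at hrec
          rw [hrec, hwin]
          simp only [mcGreedy, mcGreedy_nil_right]
          push_cast; omega
      | cons y ys =>
          have hjlt : j.toNat < s.length := by
            by_contra hc
            rw [not_lt] at hc
            rw [List.drop_eq_nil_of_le hc] at hs
            cases hs
          have hsj : PySem.List.pyGet? s j = some (s[j.toNat]'hjlt) :=
            PySem.List.pyGet?_eq_some_getElem s h0j (by omega)
          obtain ⟨hy, hys⟩ : s[j.toNat]'hjlt = y ∧ s.drop (j.toNat + 1) = ys := by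
            have h2 := List.getElem_cons_drop hjlt
            rw [hs] at h2
            injection h2 with h3 h4
            exact ⟨h3, h4⟩
          simp only [aLoop, hval, hsj]
          by_cases hxy : val[i.toNat]'hiN = y
          · rw [if_neg (by simp [hxy, hy])]
            have hrec := ih (i + 1) (j + 1) ans (by omega) (by omega) hlen'
            rw [hi1, show (j + 1).toNat = j.toNat + 1 by omega, hys] at hrec
            rw [hrec, hwin]
            simp only [mcGreedy]
            push_cast; omega
          · rw [if_pos (by simp [hy]; exact fun hc => hxy (by rw [hc]))]
            have hrec := ih (i + 1) j (ans + 1) (by omega) h0j hlen'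
            rw [hi1, hs] at hrec
            rw [hrec, hwin]
            simp only [mcGreedy]
            push_cast; omega

-- ===== B-side: characterization of the info dict =====

-- f and l are the first and last occurrence indices of v, c = its multiplicity
def GoodFL (val : List Int) (v f l : Int) : Prop :=
  0 ≤ f ∧ f ≤ l ∧ l < (val.length : Int) ∧
  (val.take f.toNat).count v = 0 ∧ val[f.toNat]? = some v ∧
  val[l.toNat]? = some v ∧ (val.drop (l.toNat + 1)).count v = 0

theorem buildInfo_snoc (val : List Int) (x : Int) :
    buildInfo (val ++ [x]) = infoStep (buildInfo val) ((val.length : Int), x) := by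
  unfold buildInfo
  rw [PySem.List.enumerate_append, List.foldl_append]
  simp [PySem.List.enumerate_cons, PySem.List.enumerate_nil]

theorem buildInfo_keys (val : List Int) :
    (buildInfo val).keys = PySem.Set.ofList val := by
  unfold buildInfo infoStep
  rw [PySem.Dict.keys_foldl_insert_key (PySem.List.enumerate val 0) (fun ix => ix.2)
    (fun d ix => ((d.getD ix.2 (ix.1, ix.1, 0)).1, ix.1, (d.getD ix.2 (ix.1, ix.1, 0)).2.2 + 1))
    PySem.Dict.empty]
  rw [PySem.List.map_snd_enumerate]
  rfl

theorem buildInfo_keys_nodup (val : List Int) : (buildInfo val).keys.Nodup := by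
  unfold buildInfo infoStep
  exact PySem.Dict.nodup_keys_foldl_insert_key (PySem.List.enumerate val 0) (fun ix => ix.2)
    (fun d ix => ((d.getD ix.2 (ix.1, ix.1, 0)).1, ix.1, (d.getD ix.2 (ix.1, ix.1, 0)).2.2 + 1))
    PySem.Dict.empty (by simp [PySem.Dict.keys_empty])

theorem buildInfo_get?_of_not_mem (val : List Int) (v : Int) (hv : v ∉ val) :
    (buildInfo val).get? v = none := by
  rw [PySem.Dict.get?_eq_none_iff_not_mem_keys, buildInfo_keys]
  rw [PySem.Set.mem_ofList]
  exact hv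

theorem buildInfo_get? (val : List Int) (v : Int) (hv : v ∈ val) :
    ∃ f l : Int, (buildInfo val).get? v = some (f, l, (val.count v : Int)) ∧ GoodFL val v f l := by
  induction val using List.reverseRecOn with
  | nil => cases hv
  | append_singleton val x ih =>
      rw [buildInfo_snoc]
      have hstep : infoStep (buildInfo val) ((val.length : Int), x)
          = (buildInfo val).insert x
              (((buildInfo val).getD x ((val.length : Int), (val.length : Int), 0)).1,
               (val.length : Int),
               ((buildInfo val).getD x ((val.length : Int), (val.length : Int), 0)).2.2 + 1) := rfl
      rw [hstep]
      have hLt : ((val.length : Int)).toNat = val.length := Int.toNat_natCast _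
      by_cases hvx : v = x
      · subst hvx
        rw [PySem.Dict.get?_insert_self]
        by_cases hx : v ∈ val
        · obtain ⟨f, l, hget, hGood⟩ := ih hx
          obtain ⟨hf0, hfl, hllen, htake, hfv, hlv, hdrop⟩ := hGood
          rw [PySem.Dict.getD_of_get?_eq_some _ _ hget]
          refine ⟨f, (val.length : Int), ?_, ?_⟩
          · have hcnt : (val ++ [v]).count v = val.count v + 1 := by
              simp [List.count_append]
            rw [hcnt]
            rfl
          · refine ⟨hf0, by omega, by simp only [List.length_append, List.length_cons, List.length_nil]; push_cast; omega, ?_, ?_, ?_, ?_⟩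
            · rw [List.take_append_of_le_length (by omega : f.toNat ≤ val.length)]
              exact htake
            · rw [List.getElem?_append_left (by omega : f.toNat < val.length)]
              exact hfv
            · rw [hLt, List.getElem?_concat_length]
            · rw [hLt, List.drop_eq_nil_of_le (by simp [List.length_append])]
              rfl
        · rw [PySem.Dict.getD_of_get?_eq_none _ _ (buildInfo_get?_of_not_mem val v hx)]
          refine ⟨(val.length : Int), (val.length : Int), ?_, ?_⟩
          · have hcnt : (val ++ [v]).count v = 1 := by
              simp [List.count_append, List.count_eq_zero.mpr hx]
            rw [hcnt]
            rfl
          · refine ⟨by omega, le_rfl, by simp, ?_, ?_, ?_, ?_⟩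
            · rw [hLt, List.take_append_of_le_length le_rfl, List.take_length]
              exact List.count_eq_zero.mpr hx
            · rw [hLt, List.getElem?_concat_length]
            · rw [hLt, List.getElem?_concat_length]
            · rw [hLt, List.drop_eq_nil_of_le (by simp [List.length_append])]
              rfl
      · rw [PySem.Dict.get?_insert_of_ne _ _ hvx]
        have hvval : v ∈ val := by
          rcases List.mem_append.mp hv with h | h
          · exact h
          · simp at h
            exact absurd h hvx
        obtain ⟨f, l, hget, hGood⟩ := ih hvval
        obtain ⟨hf0, hfl, hllen, htake, hfv, hlv, hdrop⟩ := hGood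
        refine ⟨f, l, ?_, ?_⟩
        · rw [hget]
          have hcnt : (val ++ [x]).count v = val.count v := by
            simp [List.count_append, Ne.symm hvx]
          rw [hcnt]
        · refine ⟨hf0, hfl, by simp only [List.length_append, List.length_cons, List.length_nil]; push_cast; omega, ?_, ?_, ?_, ?_⟩
          · rw [List.take_append_of_le_length (by omega : f.toNat ≤ val.length)]
            exact htake
          · rw [List.getElem?_append_left (by omega : f.toNat < val.length)]
            exact hfv
          · rw [List.getElem?_append_left (by omega : l.toNat < val.length)]
            exact hlv
          · rw [List.drop_append_of_le_length (by omega : l.toNat + 1 ≤ val.length)]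
            simp [List.count_append, hdrop, Ne.symm hvx]

-- ===== B-side: run lemmas for the greedy match count =====

theorem mc_full (v : Int) : ∀ (ys zs rest : List Int),
    mcGreedy (ys ++ v :: zs) (List.replicate ((ys ++ [v]).count v) v ++ rest)
      = (ys ++ [v]).count v + mcGreedy zs rest := by
  intro ys
  induction ys with
  | nil =>
      intro zs rest
      have h1 : (([] : List Int) ++ [v]).count v = 1 := by simp
      rw [h1, List.replicate_one]
      simp only [List.nil_append, List.singleton_append]
      simp [mcGreedy]
      omega
  | cons x ys ih =>
      intro zs rest
      have hc1 : 1 ≤ (ys ++ [v]).count v := by simp [List.count_append]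
      by_cases hxv : x = v
      · have hcnt : ((x :: ys) ++ [v]).count v = (ys ++ [v]).count v + 1 := by
          simp [List.cons_append, hxv]
        rw [hcnt, List.replicate_succ, List.cons_append, List.cons_append]
        simp only [mcGreedy, if_pos hxv]
        rw [ih zs rest]
        omega
      · have hcnt : ((x :: ys) ++ [v]).count v = (ys ++ [v]).count v := by
          simp [List.cons_append, hxv]
        rw [hcnt]
        obtain ⟨k, hk⟩ : ∃ k, (ys ++ [v]).count v = k + 1 := ⟨(ys ++ [v]).count v - 1, by omega⟩
        rw [hk, List.replicate_succ, List.cons_append, List.cons_append]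
        simp only [mcGreedy, if_neg hxv]
        rw [show (v :: (List.replicate k v ++ rest)) = List.replicate (k + 1) v ++ rest by
          rw [List.replicate_succ, List.cons_append]]
        rw [← hk, ih zs rest, hk]

theorem mc_partial (v : Int) : ∀ (xs : List Int) (c : Nat) (rest : List Int),
    xs.count v < c →
    mcGreedy xs (List.replicate c v ++ rest) = xs.count v := by
  intro xs
  induction xs with
  | nil =>
      intro c rest _
      simp [mcGreedy]
  | cons x xs ih =>
      intro c rest h
      obtain ⟨k, rfl⟩ : ∃ k, c = k + 1 := ⟨c - 1, by omega⟩
      rw [List.replicate_succ, List.cons_append]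
      by_cases hxv : x = v
      · simp only [mcGreedy, if_pos hxv]
        have hcnt : (x :: xs).count v = xs.count v + 1 := by
          simp [hxv]
        rw [hcnt] at h ⊢
        rw [ih k rest (by omega)]
      · simp only [mcGreedy, if_neg hxv]
        have hcnt : (x :: xs).count v = xs.count v := by
          simp [hxv]
        rw [hcnt] at h ⊢
        rw [show (v :: (List.replicate k v ++ rest)) = List.replicate (k + 1) v ++ rest by
          rw [List.replicate_succ, List.cons_append]]
        exact ih (k + 1) rest h

theorem count_runs (m : Int → Nat) (a : Int) :
    ∀ ks : List Int, ks.Nodup →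
      (ks.flatMap (fun v => List.replicate (m v) v)).count a = if a ∈ ks then m a else 0 := by
  intro ks
  induction ks with
  | nil => simp
  | cons v ks ih =>
      intro hnd
      rw [List.flatMap_cons, List.count_append, ih hnd.of_cons, List.count_replicate]
      by_cases hav : a = v
      · subst hav
        have hna : a ∉ ks := (List.nodup_cons.mp hnd).1
        simp [hna]
      · simp [hav, Ne.symm hav]

theorem replicate_pairwise_le (v : Int) (n : Nat) :
    (List.replicate n v).Pairwise (fun a b : Int => a ≤ b) := by
  induction n with
  | zero => simp
  | succ n ih =>
      rw [List.replicate_succ]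
      exact List.Pairwise.cons (fun b hb => le_of_eq (List.eq_of_mem_replicate hb).symm) ih

theorem runs_pairwise_le (m : Int → Nat) :
    ∀ ks : List Int, ks.Pairwise (· < ·) →
      (ks.flatMap (fun v => List.replicate (m v) v)).Pairwise (fun a b : Int => a ≤ b) := by
  intro ks
  induction ks with
  | nil => simp
  | cons v ks ih =>
      intro hp
      rw [List.flatMap_cons]
      rw [List.pairwise_append]
      refine ⟨replicate_pairwise_le v (m v), ih hp.of_cons, ?_⟩
      intro a ha b hb
      obtain ⟨u, hu, hbu⟩ := List.mem_flatMap.mp hb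
      rw [List.eq_of_mem_replicate ha, List.eq_of_mem_replicate hbu]
      exact le_of_lt (List.rel_of_pairwise_cons hp hu)

-- sorted(val) is the concatenation of the runs of the sorted distinct values
theorem sorted_eq_runs (val : List Int) :
    PySem.List.sorted val (fun x => x) false
      = (PySem.List.sorted (PySem.Set.ofList val) (fun x => x) false).flatMap
          (fun v => List.replicate (val.count v) v) := by
  have hlt : (PySem.List.sorted (PySem.Set.ofList val) (fun x => x) false).Pairwise (· < ·) :=
    PySem.List.sorted_ofList_pairwise_lt val
  have hnodup : (PySem.List.sorted (PySem.Set.ofList val) (fun x => x) false).Nodup :=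
    hlt.imp ne_of_lt
  have hmem : ∀ a : Int, a ∈ PySem.List.sorted (PySem.Set.ofList val) (fun x => x) false ↔ a ∈ val := by
    intro a
    rw [PySem.List.mem_sorted, PySem.Set.mem_ofList]
  apply PySem.List.sorted_id_eq_of_perm_of_pairwise
  · rw [List.perm_iff_count]
    intro a
    rw [count_runs (fun v => val.count v) a _ hnodup]
    by_cases ha : a ∈ PySem.List.sorted (PySem.Set.ofList val) (fun x => x) false
    · rw [if_pos ha]
    · rw [if_neg ha]
      exact (List.count_eq_zero.mpr (fun hc => ha ((hmem a).mpr hc))).symm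
  · exact runs_pairwise_le (fun v => val.count v) _ hlt

theorem sorted_items_eq (val : List Int) :
    PySem.List.sorted (buildInfo val).items (fun q => q.1) false
      = (PySem.List.sorted (PySem.Set.ofList val) (fun x => x) false).map
          (fun k => (k, (buildInfo val).getD k (0, 0, 0))) := by
  have hitems : (buildInfo val).items
      = (PySem.Set.ofList val).map (fun k => (k, (buildInfo val).getD k (0, 0, 0))) := by
    rw [PySem.Dict.items_eq_map_keys (buildInfo val) (buildInfo_keys_nodup val) (0, 0, 0),
      buildInfo_keys]
  rw [hitems]
  apply PySem.List.sorted_eq_of_perm_of_pairwise_lt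
  · exact (PySem.List.sorted_perm (PySem.Set.ofList val) (fun x => x) false).map _
  · rw [List.pairwise_map]
    exact PySem.List.sorted_ofList_pairwise_lt val

-- a value whose occurrences all lie in the window is fully matched and the
-- window pointer jumps past its last occurrence
theorem window_full (val : List Int) (n p f l v : Int) (runs : List Int)
    (hf0 : 0 ≤ f) (hfl : f ≤ l) (_hllen : l < (val.length : Int))
    (htake : (val.take f.toNat).count v = 0) (hlv : val[l.toNat]? = some v)
    (hdrop : (val.drop (l.toNat + 1)).count v = 0)
    (h0p : 0 ≤ p) (hpf : p ≤ f) (hln : l < n) (hnlen : n ≤ (val.length : Int)) :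
    mcGreedy ((val.take n.toNat).drop p.toNat) (List.replicate (val.count v) v ++ runs)
      = val.count v + mcGreedy ((val.take n.toNat).drop (l.toNat + 1)) runs := by
  have hppff : p.toNat ≤ f.toNat := by omega
  have hffll : f.toNat ≤ l.toNat := by omega
  have hllnn : l.toNat < n.toNat := by omega
  have hnnlen : n.toNat ≤ val.length := by omega
  set wp := (val.take n.toNat).drop p.toNat with hwp
  set j := l.toNat - p.toNat with hj
  have hwpj : wp[j]? = some v := by
    rw [hwp, List.getElem?_drop, show p.toNat + j = l.toNat by omega,
      List.getElem?_take_of_lt hllnn]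
    exact hlv
  obtain ⟨hjlt, hwpjv⟩ := List.getElem?_eq_some_iff.mp hwpj
  have hdecomp : wp = wp.take j ++ v :: wp.drop (j + 1) := by
    conv_lhs => rw [← List.take_append_drop j wp, ← List.getElem_cons_drop hjlt, hwpjv]
  have hzs : wp.drop (j + 1) = (val.take n.toNat).drop (l.toNat + 1) := by
    rw [hwp, List.drop_drop, show p.toNat + (j + 1) = l.toNat + 1 by omega]
  have hc_zs : (wp.drop (j + 1)).count v = 0 := by
    rw [hzs]
    have hsub : List.Sublist ((val.take n.toNat).drop (l.toNat + 1)) (val.drop (l.toNat + 1)) := by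
      rw [List.drop_take]
      exact List.take_sublist _ _
    have := hsub.count_le v
    omega
  have hc_take : (val.take p.toNat).count v = 0 := by
    have hsub : List.Sublist (val.take p.toNat) (val.take f.toNat) := by
      rw [show val.take p.toNat = (val.take f.toNat).take p.toNat by
        rw [List.take_take, Nat.min_eq_left hppff]]
      exact List.take_sublist _ _
    have := hsub.count_le v
    omega
  have hc_dropn : (val.drop n.toNat).count v = 0 := by
    have hsub : List.Sublist (val.drop n.toNat) (val.drop (l.toNat + 1)) := by
      rw [show val.drop n.toNat = (val.drop (l.toNat + 1)).drop (n.toNat - (l.toNat + 1)) by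
        rw [List.drop_drop, show l.toNat + 1 + (n.toNat - (l.toNat + 1)) = n.toNat by omega]]
      exact List.drop_sublist _ _
    have := hsub.count_le v
    omega
  have hsplit : val.drop p.toNat = wp ++ val.drop n.toNat := by
    conv_lhs => rw [← List.take_append_drop (n.toNat - p.toNat) (val.drop p.toNat)]
    congr 1
    · rw [hwp, List.drop_take]
    · rw [List.drop_drop, show p.toNat + (n.toNat - p.toNat) = n.toNat by omega]
  have hcwp : wp.count v = val.count v := by
    conv_rhs => rw [← List.take_append_drop p.toNat val, List.count_append, hsplit,
      List.count_append]
    omega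
  have hcount_ys : ((wp.take j) ++ [v]).count v = val.count v := by
    have hd : wp.count v = (wp.take j).count v + 1 + (wp.drop (j + 1)).count v := by
      conv_lhs => rw [hdecomp]
      simp [List.count_append]
      omega
    have h1 : ((wp.take j) ++ [v]).count v = (wp.take j).count v + 1 := by
      simp [List.count_append]
    omega
  calc mcGreedy wp (List.replicate (val.count v) v ++ runs)
      = mcGreedy (wp.take j ++ v :: wp.drop (j + 1))
          (List.replicate (((wp.take j) ++ [v]).count v) v ++ runs) := by
        rw [← hdecomp, hcount_ys]
    _ = ((wp.take j) ++ [v]).count v + mcGreedy (wp.drop (j + 1)) runs :=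
        mc_full v (wp.take j) (wp.drop (j + 1)) runs
    _ = val.count v + mcGreedy ((val.take n.toNat).drop (l.toNat + 1)) runs := by
        rw [hcount_ys, hzs]

-- a value with an occurrence outside the window matches only its in-window
-- occurrences, and the greedy process never gets past its run
theorem window_partial (val : List Int) (n p f l v : Int) (runs : List Int)
    (hf0 : 0 ≤ f) (hfl : f ≤ l) (_hllen : l < (val.length : Int))
    (hfv : val[f.toNat]? = some v) (hlv : val[l.toNat]? = some v)
    (h0p : 0 ≤ p) (hpn : p ≤ n) (_hnlen : n ≤ (val.length : Int))
    (hcond : ¬ (p ≤ f ∧ l < n)) :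
    mcGreedy ((val.take n.toNat).drop p.toNat) (List.replicate (val.count v) v ++ runs)
      = ((val.take n.toNat).drop p.toNat).count v := by
  set wp := (val.take n.toNat).drop p.toNat with hwp
  have hsplit : val.drop p.toNat = wp ++ val.drop n.toNat := by
    conv_lhs => rw [← List.take_append_drop (n.toNat - p.toNat) (val.drop p.toNat)]
    congr 1
    · rw [hwp, List.drop_take]
    · rw [List.drop_drop, show p.toNat + (n.toNat - p.toNat) = n.toNat by omega]
  have hctotal : val.count v = (val.take p.toNat).count v + wp.count v + (val.drop n.toNat).count v := by
    conv_lhs => rw [← List.take_append_drop p.toNat val, List.count_append, hsplit,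
      List.count_append]
    omega
  have hlt : wp.count v < val.count v := by
    rcases (by omega : f < p ∨ n ≤ l) with hc | hc
    · have hmem : v ∈ val.take p.toNat := by
        apply List.mem_of_getElem? (i := f.toNat)
        rw [List.getElem?_take_of_lt (by omega : f.toNat < p.toNat)]
        exact hfv
      have := List.count_pos_iff.mpr hmem
      omega
    · have hmem : v ∈ val.drop n.toNat := by
        apply List.mem_of_getElem? (i := l.toNat - n.toNat)
        rw [List.getElem?_drop, show n.toNat + (l.toNat - n.toNat) = l.toNat by omega]
        exact hlv
      have := List.count_pos_iff.mpr hmem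
      omega
  exact mc_partial v wp (val.count v) runs hlt

theorem altLoop_eq (val : List Int) (n : Int) (g : Int → Int × Int × Int) :
    ∀ (ks : List Int) (p matched : Int),
      (∀ v ∈ ks, ∃ f l, g v = (f, l, (val.count v : Int)) ∧ GoodFL val v f l) →
      0 ≤ p → p ≤ n → n ≤ (val.length : Int) →
      altLoop val n (ks.map (fun k => (k, g k))) p matched
        = matched + (mcGreedy ((val.take n.toNat).drop p.toNat)
            (ks.flatMap (fun v => List.replicate (val.count v) v)) : Int) := by
  intro ks
  induction ks with
  | nil =>
      intro p matched _ _ _ _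
      simp [altLoop, mcGreedy_nil_right]
  | cons v ks ih =>
      intro p matched hg h0p hpn hnlen
      obtain ⟨f, l, hgv, hGood⟩ := hg v (List.mem_cons_self ..)
      obtain ⟨hf0, hfl, hllen, htake, hfv, hlv, hdrop⟩ := hGood
      simp only [List.map_cons, List.flatMap_cons, hgv]
      simp only [altLoop]
      by_cases hcond : p ≤ f ∧ l < n
      · rw [if_pos hcond]
        have h0l : 0 ≤ l := le_trans hf0 hfl
        have hrec := ih (l + 1) (matched + (val.count v : Int))
          (fun u hu => hg u (List.mem_cons_of_mem _ hu)) (by omega) (by omega) hnlen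
        rw [hrec, show (l + 1).toNat = l.toNat + 1 by omega]
        rw [window_full val n p f l v _ hf0 hfl hllen htake hlv hdrop h0p hcond.1 hcond.2 hnlen]
        push_cast
        ring
      · rw [if_neg hcond]
        rw [window_partial val n p f l v _ hf0 hfl hllen hfv hlv h0p hpn hnlen hcond]
        have hslice : PySem.List.slice val (some p) (some n)
            = (val.take n.toNat).drop p.toNat := by
          rw [PySem.List.slice_toNat val h0p (by omega : (0:Int) ≤ n), List.drop_take]
        rw [hslice]

-- ===== VERDICT (by name: the statement is the Claim_ definition above) =====
theorem solve_spec : Claim_equal_solve := by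
  intro N val _ hPre
  unfold Pre_solve at hPre
  unfold Spec_solve solve solve_alt
  dsimp only
  rw [sorted_items_eq]
  have hg : ∀ v ∈ PySem.List.sorted (PySem.Set.ofList val) (fun x => x) false,
      ∃ f l, (buildInfo val).getD v (0, 0, 0) = (f, l, (val.count v : Int)) ∧ GoodFL val v f l := by
    intro v hv
    have hvval : v ∈ val := (PySem.Set.mem_ofList _ _).mp ((PySem.List.mem_sorted _ _ _ _).mp hv)
    obtain ⟨f, l, hget, hGood⟩ := buildInfo_get? val v hvval
    exact ⟨f, l, PySem.Dict.getD_of_get?_eq_some _ _ hget, hGood⟩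
  by_cases hN : 0 ≤ N
  · rw [show max N 0 = N from max_eq_left hN]
    have h1 := foldl_eq_aLoop val (PySem.List.sorted val (fun x => x) false) N.toNat 0 0 0
    rw [show (0 : Int) + ((N.toNat : Nat) : Int) = N by omega] at h1
    rw [h1]
    have h2 := aLoop_eq_mc val (PySem.List.sorted val (fun x => x) false) N.toNat 0 0 0
      le_rfl le_rfl (by omega)
    rw [h2]
    have halt := altLoop_eq val N (fun k => (buildInfo val).getD k (0, 0, 0))
      (PySem.List.sorted (PySem.Set.ofList val) (fun x => x) false) 0 0 hg le_rfl hN hPre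
    rw [halt, ← sorted_eq_runs]
    simp only [Int.toNat_zero, List.drop_zero]
    omega
  · rw [PySem.List.pyRange_one_eq_nil (by omega : N ≤ (0 : Int))]
    rw [show max N 0 = 0 from max_eq_right (by omega)]
    have halt := altLoop_eq val 0 (fun k => (buildInfo val).getD k (0, 0, 0))
      (PySem.List.sorted (PySem.Set.ofList val) (fun x => x) false) 0 0 hg le_rfl le_rfl
      (by omega)
    rw [halt, ← sorted_eq_runs]
    simp [mcGreedy]
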